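-- pv_equiv track=rewrite | github.com/saurabh47/Data-structures-and-algorithms | leetcode/problem_2579.py | coloredCells
-- ===== SOURCE A (Python) =====
-- def coloredCells(n: int) -> int:
--
--     # f(1) => 1
--     # f(2) => f(1) + 4 => 1 + 4 = 5
--     # f(3) => f(2) + 4 * 2 = 13
--     # f(4) => f(3) + 4 * 3 = 13 + 12 = 25
--     # f(5) => f(4) + 4 * 4 = 25 + 16 = 41
--     # f(6) => f(5) + 4 * 5 = 41 + 20 = 61
--     result = 1
--     prev = 1
--     if(n == 1):
--         return result
--     for i in range(2, n+1):
--         result = prev + 4 * (i - 1)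
--         prev = result
--     return result
-- ===== SOURCE B (Python) =====
-- def coloredCells(n: int) -> int:
--     # closed form: 1 + 4*(1+2+...+(n-1)) = 2n^2 - 2n + 1
--     return 2 * n * n - 2 * n + 1
-- ===== Notes on version B (the rewrite author's own statement) =====
-- stated objective: faster
-- what changed: Replaced the O(n) accumulation loop by the closed-form formula 2n^2-2n+1.
-- outside the precondition, e.g. on coloredCells(-3): A returns 1, B returns 25
import Mathlib
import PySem

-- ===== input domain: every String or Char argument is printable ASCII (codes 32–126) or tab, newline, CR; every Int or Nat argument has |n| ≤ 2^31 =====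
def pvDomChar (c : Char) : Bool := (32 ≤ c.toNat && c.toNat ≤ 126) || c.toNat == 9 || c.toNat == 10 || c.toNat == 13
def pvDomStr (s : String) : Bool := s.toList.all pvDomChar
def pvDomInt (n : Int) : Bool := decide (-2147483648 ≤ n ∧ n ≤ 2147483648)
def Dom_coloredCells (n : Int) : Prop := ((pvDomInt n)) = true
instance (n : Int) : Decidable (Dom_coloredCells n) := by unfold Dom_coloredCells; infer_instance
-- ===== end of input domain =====

-- B replaces A's accumulation loop by the closed-form formula 2n^2-2n+1 (O(1) vs O(n)).

-- ===== PORT A =====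
def coloredCells (n : Int) : Int :=
  -- result = 1; prev = 1; if n == 1: return result
  if n == 1 then 1
  else
    -- for i in range(2, n+1): result = prev + 4*(i-1); prev = result
    ((PySem.List.pyRange 2 (n + 1) 1).foldl
      (fun (s : Int × Int) i =>
        let result := s.2 + 4 * (i - 1)
        (result, result))
      (1, 1)).1

-- ===== PORT B =====
def coloredCells_alt (n : Int) : Int := 2 * n * n - 2 * n + 1

-- ===== PRECONDITION & SPEC =====
-- Pre_ restricts to the problem's natural domain (a number of expansion steps):
-- for negative n A's loop body never runs and it returns the initial 1, while B's
-- closed form returns the quadratic value; such n are outside the task's domain.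
def Pre_coloredCells (n : Int) : Prop := 0 ≤ n
instance (n : Int) : Decidable (Pre_coloredCells n) := by unfold Pre_coloredCells; infer_instance
def pvWitness_coloredCells : Int := 3
def Spec_coloredCells (n : Int) (out : Int) : Prop := out = coloredCells_alt n
instance (n : Int) (out : Int) : Decidable (Spec_coloredCells n out) := by unfold Spec_coloredCells; infer_instance

-- ===== CLAIM (what is proved, stated in full; the proofs are below) =====
def Claim_equal_coloredCells : Prop := ∀ (n : Int), Dom_coloredCells n → Pre_coloredCells n → Spec_coloredCells n (coloredCells n)

-- ===== LEMMAS AND PROOFS =====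

-- loop invariant: after running the loop up to bound m+2, the state is (f(m+1), f(m+1))
-- with f(k) = 2k^2 - 2k + 1
theorem coloredCells_loop (m : Nat) :
    ((PySem.List.pyRange 2 ((m : Int) + 2) 1).foldl
      (fun (s : Int × Int) i =>
        let result := s.2 + 4 * (i - 1)
        (result, result))
      (1, 1)) =
    (2 * ((m : Int) + 1) * ((m : Int) + 1) - 2 * ((m : Int) + 1) + 1,
     2 * ((m : Int) + 1) * ((m : Int) + 1) - 2 * ((m : Int) + 1) + 1) := by
  induction m with
  | zero =>
    simp [PySem.List.pyRange_one_eq_nil (a := 2) (b := 2) le_rfl]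
  | succ k ih =>
    have hsplit : PySem.List.pyRange 2 ((k : Int) + 1 + 2) 1 =
        PySem.List.pyRange 2 ((k : Int) + 2) 1 ++ [(k : Int) + 2] := by
      have := PySem.List.pyRange_one_succ_right (a := 2) (b := (k : Int) + 2) (by omega)
      simpa [add_assoc, add_comm, add_left_comm] using this
    push_cast
    rw [hsplit, List.foldl_append, ih]
    simp only [List.foldl_cons, List.foldl_nil]
    rw [Prod.mk.injEq]
    constructor <;> ring

-- ===== VERDICT (by name: the statement is the Claim_ definition above) =====
theorem coloredCells_spec : Claim_equal_coloredCells := by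
  intro n _ hpre
  have hpre' : 0 ≤ n := hpre
  unfold Spec_coloredCells coloredCells coloredCells_alt
  by_cases h1 : n = 1
  · subst h1; norm_num
  · simp only [beq_iff_eq, if_neg h1]
    by_cases h0 : n = 0
    · subst h0
      rw [PySem.List.pyRange_one_eq_nil (by omega)]
      norm_num
    · -- n ≥ 2
      have hn : 2 ≤ n := by omega
      obtain ⟨m, hm⟩ : ∃ m : Nat, n = (m : Int) + 2 := ⟨(n - 2).toNat, by omega⟩
      subst hm
      have := coloredCells_loop (m + 1)
      push_cast at this ⊢
      rw [show (m : Int) + 2 + 1 = (m : Int) + 1 + 2 by ring, this]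
      ring
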